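-- pv_equiv track=rewrite | github.com/zashb/programming | datstr/probs/5queues/1.py | checkStackPairwiseOrder
-- ===== SOURCE A (Python) =====
-- from collections import deque
--
-- def checkStackPairwiseOrder(stk):
--     queue = deque()
--     pairwiseOrd = True
--     # while stk is not empty,pop elems into queue
--     while stk:
--         queue.append(stk.pop())
--     # while queue is not empty, dequeue into stack
--     while queue:
--         stk.append(queue.popleft())
--     # while stk is not empty
--     while stk:
--         # stk pop() and queue append()
--         n = stk.pop()
--         queue.append(n)
--         if stk:
--             # stk pop() and queue append again
--             m = stk.pop()
--             queue.append(m)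
--             if abs(n - m) != 1:
--                 pairwiseOrd = False
--                 break
--     while queue:
--         stk.append(queue.popleft())
--     return pairwiseOrd
-- ===== SOURCE B (Python) =====
-- def checkStackPairwiseOrder(stk):
--     return all(abs(stk[i] - stk[i + 1]) == 1 for i in range(0, len(stk) - 1, 2))
-- ===== Notes on version B (the rewrite author's own statement) =====
-- stated objective: simpler
-- what changed: A shuffles the stack through a deque four times, popping pairs and restoring state; B is a single non-mutating indexed scan checking abs(stk[i]-stk[i+1])==1 at even i (no deque, no mutation; measured constant-factor speedup from dropping the shuffle passes).
import Mathlib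
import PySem

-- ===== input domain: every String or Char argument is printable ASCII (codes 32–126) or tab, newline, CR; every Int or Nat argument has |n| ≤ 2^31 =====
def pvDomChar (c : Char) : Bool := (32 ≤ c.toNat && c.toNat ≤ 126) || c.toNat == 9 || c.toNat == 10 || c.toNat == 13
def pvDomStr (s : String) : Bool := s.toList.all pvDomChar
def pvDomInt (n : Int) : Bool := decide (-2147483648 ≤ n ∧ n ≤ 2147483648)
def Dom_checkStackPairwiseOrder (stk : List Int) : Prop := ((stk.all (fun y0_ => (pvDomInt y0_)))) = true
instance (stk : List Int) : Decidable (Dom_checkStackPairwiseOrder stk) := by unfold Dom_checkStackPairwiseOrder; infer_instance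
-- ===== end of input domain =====

-- B replaces A's four stack/deque shuffle loops by one direct scan over the even index
-- pairs (simpler, no auxiliary deque). The equivalence proved here is about the RETURN
-- value only: Python A mutates stk in place (restoring it on success, but leaving it
-- reordered after an early mismatch break), while B never mutates its argument.

-- ===== PORT A =====
-- while stk: queue.append(stk.pop())      (stk.pop() = last element; returns final queue)
def pvLoop1 (s q : List Int) : List Int :=
  if hs : s = [] then q
  else pvLoop1 s.dropLast (q ++ [s.getLast hs])
termination_by s.length
decreasing_by have := List.length_pos_of_ne_nil hs; simp [List.length_dropLast]; omega

-- while queue: stk.append(queue.popleft())     (returns final stk)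
def pvLoop2 (s q : List Int) : List Int :=
  match q with
  | [] => s
  | x :: q' => pvLoop2 (s ++ [x]) q'

-- the main while loop: pop n (and m if stk nonempty), compare, break on mismatch;
-- returns the final (stk, queue, pairwiseOrd) state
def pvLoop3 (s q : List Int) (p : Bool) : List Int × List Int × Bool :=
  if hs : s = [] then (s, q, p)
  else
    let n := s.getLast hs
    let s1 := s.dropLast
    if hs1 : s1 = [] then pvLoop3 s1 (q ++ [n]) p
    else
      let m := s1.getLast hs1
      let s2 := s1.dropLast
      if (n - m).natAbs ≠ 1 then (s2, q ++ [n] ++ [m], false)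
      else pvLoop3 s2 (q ++ [n] ++ [m]) p
termination_by s.length
decreasing_by
  · have := List.length_pos_of_ne_nil hs; simp [List.length_dropLast]; omega
  · have := List.length_pos_of_ne_nil hs; simp [List.length_dropLast]; omega

def checkStackPairwiseOrder (stk : List Int) : Bool :=
  let queue := pvLoop1 stk []
  let stk2 := pvLoop2 [] queue
  match pvLoop3 stk2 [] true with
  | (stkR, queueR, pairwiseOrd) =>
    let _restored := pvLoop2 stkR queueR  -- the final restore loop (only affects the mutated stk)
    pairwiseOrd

-- ===== PORT B =====
def checkStackPairwiseOrder_alt (stk : List Int) : Bool :=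
  (PySem.List.pyRange 0 ((stk.length : Int) - 1) 2).all
    (fun i => (PySem.List.pyGetD stk i 0 - PySem.List.pyGetD stk (i + 1) 0).natAbs == 1)

-- ===== PRECONDITION & SPEC =====
def Spec_checkStackPairwiseOrder (stk : List Int) (out : Bool) : Prop := out = checkStackPairwiseOrder_alt stk
instance (stk : List Int) (out : Bool) : Decidable (Spec_checkStackPairwiseOrder stk out) := by unfold Spec_checkStackPairwiseOrder; infer_instance

-- ===== CLAIM (what is proved, stated in full; the proofs are below) =====
def Claim_equal_checkStackPairwiseOrder : Prop := ∀ (stk : List Int), Dom_checkStackPairwiseOrder stk → Spec_checkStackPairwiseOrder stk (checkStackPairwiseOrder stk)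

-- ===== LEMMAS AND PROOFS =====

-- common characterisation of both programs: consume the list two elements at a time
def pairsOk : List Int → Bool
  | a :: b :: r => if (a - b).natAbs = 1 then pairsOk r else false
  | _ => true

theorem pvLoop1_spec (s : List Int) : ∀ q, pvLoop1 s q = q ++ s.reverse := by
  induction s using List.reverseRecOn with
  | nil => intro q; rw [pvLoop1]; simp
  | append_singleton l x ih =>
      intro q
      rw [pvLoop1]
      simp [ih]

theorem pvLoop2_spec (q : List Int) : ∀ s, pvLoop2 s q = s ++ q := by
  induction q with
  | nil => intro s; simp [pvLoop2]
  | cons x q' ih => intro s; rw [pvLoop2, ih]; simp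

theorem pvLoop3_spec (l : List Int) : ∀ q, (pvLoop3 l.reverse q true).2.2 = pairsOk l := by
  induction l using pairsOk.induct with
  | case1 a b r h ih =>
      intro q
      have h1 : (a :: b :: r).reverse = (r.reverse ++ [b]) ++ [a] := by simp
      rw [h1, pvLoop3]
      simp only [List.append_eq_nil_iff, List.cons_ne_nil, and_false, dite_false,
        List.dropLast_concat, List.getLast_concat, h]
      simp [pairsOk, h, ih]
  | case2 a b r h =>
      intro q
      have h1 : (a :: b :: r).reverse = (r.reverse ++ [b]) ++ [a] := by simp
      rw [h1, pvLoop3]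
      simp only [List.append_eq_nil_iff, List.cons_ne_nil, and_false, dite_false,
        List.dropLast_concat, List.getLast_concat]
      simp [pairsOk, h]
  | case3 t ht =>
      intro q
      rcases t with _ | ⟨a, _ | ⟨b, r⟩⟩
      · rw [pvLoop3]; simp [pairsOk]
      · show (pvLoop3 ([] ++ [a]) q true).2.2 = _
        rw [pvLoop3]
        simp [pairsOk, pvLoop3]
      · exact absurd rfl (ht a b r)

theorem alt_norm (stk : List Int) :
    checkStackPairwiseOrder_alt stk =
      (List.range (stk.length / 2)).all
        (fun k => ((PySem.List.pyGetD stk (2 * (k : Int)) 0 -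
                    PySem.List.pyGetD stk (2 * (k : Int) + 1) 0).natAbs == 1)) := by
  unfold checkStackPairwiseOrder_alt
  rw [PySem.List.pyRange_of_pos 0 ((stk.length : Int) - 1) (by norm_num)]
  rw [List.all_map]
  by_cases h : (0 : Int) < (stk.length : Int) - 1
  · rw [if_pos h]
    have h2 : (((stk.length : Int) - 1 - 0 + 2 - 1) / 2).toNat = stk.length / 2 := by omega
    rw [h2]
    simp [Function.comp_def]
  · rw [if_neg h]
    have h2 : stk.length / 2 = 0 := by omega
    rw [h2]
    simp [Function.comp_def]

theorem pyGetD_shift2 (x y : Int) (l : List Int) (i : Int) (hi : 0 ≤ i) :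
    PySem.List.pyGetD (x :: y :: l) (i + 2) 0 = PySem.List.pyGetD l i 0 := by
  rw [PySem.List.pyGetD_of_nonneg _ _ (by omega), PySem.List.pyGetD_of_nonneg _ _ hi]
  have h : (i + 2).toNat = i.toNat + 2 := by omega
  rw [h]
  simp [List.getD]

theorem alt_spec (stk : List Int) : checkStackPairwiseOrder_alt stk = pairsOk stk := by
  induction stk using pairsOk.induct with
  | case1 a b r h ih =>
      rw [alt_norm]
      have ih' := (alt_norm r).symm.trans ih
      have hlen : (a :: b :: r).length / 2 = r.length / 2 + 1 := by
        simp [List.length_cons]; omega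
      rw [hlen, List.range_succ_eq_map, List.all_cons, List.all_map]
      have hshift : ((fun k : ℕ => ((PySem.List.pyGetD (a :: b :: r) (2 * (k : Int)) 0 -
              PySem.List.pyGetD (a :: b :: r) (2 * (k : Int) + 1) 0).natAbs == 1)) ∘ Nat.succ)
          = (fun k : ℕ => ((PySem.List.pyGetD r (2 * (k : Int)) 0 -
              PySem.List.pyGetD r (2 * (k : Int) + 1) 0).natAbs == 1)) := by
        funext k
        simp only [Function.comp_apply]
        push_cast
        have e1 : (2 : Int) * ((k : Int) + 1) = 2 * (k : Int) + 2 := by ring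
        rw [e1]
        have e2 : 2 * (k : Int) + 2 + 1 = (2 * (k : Int) + 1) + 2 := by ring
        rw [e2, pyGetD_shift2 _ _ _ _ (by positivity), pyGetD_shift2 _ _ _ _ (by positivity)]
      rw [hshift, ih']
      have hb' : PySem.List.pyGetD (a :: b :: r) 1 0 = b := by
        rw [PySem.List.pyGetD_of_nonneg _ _ (by norm_num : (0:Int) ≤ 1)]; rfl
      simp [pairsOk, h, hb']
  | case2 a b r h =>
      rw [alt_norm]
      have hlen : (a :: b :: r).length / 2 = r.length / 2 + 1 := by
        simp [List.length_cons]; omega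
      rw [hlen, List.range_succ_eq_map, List.all_cons]
      have hb' : PySem.List.pyGetD (a :: b :: r) 1 0 = b := by
        rw [PySem.List.pyGetD_of_nonneg _ _ (by norm_num : (0:Int) ≤ 1)]; rfl
      simp [pairsOk, h, hb']
  | case3 t ht =>
      rcases t with _ | ⟨a, _ | ⟨b, r⟩⟩
      · rw [alt_norm]; simp [pairsOk]
      · rw [alt_norm]; simp [pairsOk]
      · exact absurd rfl (ht a b r)

-- ===== VERDICT (by name: the statement is the Claim_ definition above) =====
theorem checkStackPairwiseOrder_spec : Claim_equal_checkStackPairwiseOrder := by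
  intro stk _
  unfold Spec_checkStackPairwiseOrder checkStackPairwiseOrder
  simp only [pvLoop1_spec, pvLoop2_spec, List.nil_append]
  rw [alt_spec, ← pvLoop3_spec stk []]
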